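-- pv_equiv track=rewrite | github.com/lpmi-13/ambisense | src/ambisense/rewrite_importers.py | _wordnet_ancestors
-- ===== SOURCE A (Python) =====
-- from collections import Counter, defaultdict, deque
-- from typing import DefaultDict, Dict, Iterable, List, Optional, Set, Tuple
--
-- def _wordnet_ancestors(
--     synset_id: str,
--     parents: Dict[str, List[str]],
--     synsets: Dict[str, List[str]],
-- ) -> Set[str]:
--     """Collect ancestor lemmas for one synset."""
--     seen = set()
--     lemmas = set()
--     queue = deque([synset_id])
--     while queue:
--         current = queue.popleft()
--         if current in seen:
--             continue
--         seen.add(current)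
--         lemmas.update(synsets.get(current, []))
--         queue.extend(parents.get(current, []))
--     return lemmas
-- ===== SOURCE B (Python) =====
-- def _wordnet_ancestors(synset_id, parents, synsets):
--     """Collect ancestor lemmas for one synset.
--
--     Fixed-point saturation instead of a BFS queue: one dict serves as an
--     ordered set of reached synsets; sweep the whole of it repeatedly,
--     adding the parents of every reached synset, until a sweep adds
--     nothing new; then union the lemma lists of the saturated set.
--     """
--     reach = {synset_id: True}
--     changed = True
--     while changed:
--         changed = False
--         for node in list(reach):
--             for parent in parents.get(node, []):
--                 if parent not in reach:
--                     reach[parent] = True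
--                     changed = True
--     lemmas = set()
--     for node in reach:
--         lemmas.update(synsets.get(node, []))
--     return lemmas
-- ===== Notes on version B (the rewrite author's own statement) =====
-- stated objective: alternative
-- what changed: Replaces the deque-based BFS (FIFO queue plus separate visited set, lemma union interleaved with traversal) by fixed-point saturation: one dict used as an ordered set of reached synsets is swept in full repeatedly, adding the parents of every reached synset, until a sweep adds nothing, after which the lemma lists are unioned in a separate pass.
import Mathlib
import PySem

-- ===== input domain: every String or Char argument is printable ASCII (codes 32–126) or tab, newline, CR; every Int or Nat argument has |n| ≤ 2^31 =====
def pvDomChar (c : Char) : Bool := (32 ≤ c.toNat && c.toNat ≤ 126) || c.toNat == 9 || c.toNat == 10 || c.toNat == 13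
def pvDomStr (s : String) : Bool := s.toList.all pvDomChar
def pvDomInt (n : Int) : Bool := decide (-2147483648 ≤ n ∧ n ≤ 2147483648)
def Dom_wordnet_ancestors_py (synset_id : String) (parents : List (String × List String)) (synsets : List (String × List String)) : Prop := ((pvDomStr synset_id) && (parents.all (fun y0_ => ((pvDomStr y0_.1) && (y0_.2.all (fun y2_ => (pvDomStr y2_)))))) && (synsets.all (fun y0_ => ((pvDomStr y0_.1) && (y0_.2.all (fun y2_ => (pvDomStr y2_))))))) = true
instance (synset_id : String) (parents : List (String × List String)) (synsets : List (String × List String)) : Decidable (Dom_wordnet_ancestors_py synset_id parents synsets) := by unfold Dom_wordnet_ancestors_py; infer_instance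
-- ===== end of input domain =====

-- B replaces the deque BFS (queue + visited set, lemma union interleaved) by fixed-point
-- saturation over one dict used as an ordered set of reached synsets, then unions the
-- lemma lists in a second pass; alternative structure, same result.

-- ===== PORT A =====
-- termination helpers for the loops (cited by the ports' decreasing_by)
lemma pv_getD_subset (parents : List (String × List String)) (c x : String)
    (hx : x ∈ (PySem.Dict.mk parents).getD c []) : x ∈ parents.flatMap Prod.snd := by
  induction parents with
  | nil => simp [PySem.Dict.getD, PySem.Dict.get?] at hx
  | cons p rest ih =>
    rw [PySem.Dict.getD_eq_get?_getD, PySem.Dict.get?_mk_cons] at hx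
    cases hkc : (p.1 == c) with
    | true =>
      simp only [hkc, if_true, Option.getD_some] at hx
      exact List.mem_flatMap.2 ⟨p, List.mem_cons_self .., hx⟩
    | false =>
      simp only [hkc, Bool.false_eq_true, if_false, ← PySem.Dict.getD_eq_get?_getD] at hx
      simp only [List.flatMap_cons, List.mem_append]
      exact Or.inr (ih hx)

lemma pv_filter_lt (U : List String) (s t : PySem.Set String)
    (mono : ∀ x : String, x ∈ s → x ∈ t) (c : String) (hcU : c ∈ U)
    (hcs : c ∉ s) (hct : c ∈ t) :
    (U.filter (fun x => !PySem.Set.contains t x)).length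
      < (U.filter (fun x => !PySem.Set.contains s x)).length := by
  obtain ⟨U1, U2, rfl⟩ := List.append_of_mem hcU
  have key : ∀ a : String, (!PySem.Set.contains t a) = true → (!PySem.Set.contains s a) = true := by
    intro a ha
    simp only [Bool.not_eq_true', ← Bool.not_eq_true, PySem.Set.contains_iff] at *
    exact fun h => ha (mono a h)
  have h1 : (U1.filter (fun x => !PySem.Set.contains t x)).length
      ≤ (U1.filter (fun x => !PySem.Set.contains s x)).length := by
    simp only [← List.countP_eq_length_filter]
    exact List.countP_mono_left (fun a _ => key a)
  have h2 : (U2.filter (fun x => !PySem.Set.contains t x)).length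
      ≤ (U2.filter (fun x => !PySem.Set.contains s x)).length := by
    simp only [← List.countP_eq_length_filter]
    exact List.countP_mono_left (fun a _ => key a)
  have hc1 : (!PySem.Set.contains t c) = false := by
    simp [hct]
  have hc2 : (!PySem.Set.contains s c) = true := by
    simp [hcs]
  simp only [List.filter_append, List.filter_cons, hc1, hc2, List.length_append,
    Bool.false_eq_true, if_false, if_true, List.length_cons]
  omega

-- the BFS loop of A: queue, seen, lemmas, with the invariant 'queue ⊆ U' carried as a proof
def pvLoopA (parents synsets : List (String × List String)) (U : List String)
    (hU : ∀ x ∈ parents.flatMap Prod.snd, x ∈ U)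
    (q : List String) (seen lemmas : PySem.Set String)
    (hq : ∀ x ∈ q, x ∈ U) : List String :=
  match q with
  | [] => lemmas
  | c :: rest =>
    if hc : PySem.Set.contains seen c then
      pvLoopA parents synsets U hU rest seen lemmas
        (fun x hx => hq x (List.mem_cons_of_mem _ hx))
    else
      pvLoopA parents synsets U hU
        (rest ++ (PySem.Dict.mk parents).getD c [])
        (PySem.Set.add seen c)
        (PySem.Set.update lemmas ((PySem.Dict.mk synsets).getD c []))
        (fun x hx => by
          rcases List.mem_append.1 hx with h | h
          · exact hq x (List.mem_cons_of_mem _ h)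
          · exact hU x (pv_getD_subset parents c x h))
termination_by ((U.filter (fun x => !PySem.Set.contains seen x)).length, q.length)
decreasing_by
  · exact Prod.Lex.right _ (Nat.lt_succ_self _)
  · exact Prod.Lex.left _ _
      (pv_filter_lt U seen (PySem.Set.add seen c)
        (fun x hx => (PySem.Set.mem_add seen c x).2 (Or.inl hx))
        c (hq c (List.mem_cons_self ..))
        (fun h => hc ((PySem.Set.contains_iff seen c).2 h))
        ((PySem.Set.mem_add seen c c).2 (Or.inr rfl)))

def wordnet_ancestors_py (synset_id : String) (parents : List (String × List String)) (synsets : List (String × List String)) : List String :=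
  pvLoopA parents synsets (synset_id :: parents.flatMap Prod.snd)
    (fun x hx => List.mem_cons_of_mem _ hx)
    [synset_id] PySem.Set.empty PySem.Set.empty
    (fun x hx => by
      simp only [List.mem_singleton] at hx
      exact hx ▸ List.mem_cons_self ..)

-- ===== PORT B =====
-- inner loop of one sweep: 'for parent in parents.get(node, []): if parent not in reach: …'
def pvAddParents (ps : List String) (st : PySem.Dict String Bool × Bool) :
    PySem.Dict String Bool × Bool :=
  ps.foldl (fun st p =>
    if PySem.Dict.contains st.1 p then st else (PySem.Dict.insert st.1 p true, true)) st

-- one sweep: 'for node in list(reach): …' over the snapshot of the keys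
def pvSweep (parents : List (String × List String)) (snap : List String)
    (st : PySem.Dict String Bool × Bool) : PySem.Dict String Bool × Bool :=
  snap.foldl (fun st node => pvAddParents ((PySem.Dict.mk parents).getD node []) st) st

-- termination facts about a sweep (cited by pvFixB's decreasing_by)
lemma pvAddParents_spec (ps : List String) :
    ∀ st : PySem.Dict String Bool × Bool, ∃ Δ : List String,
      (pvAddParents ps st).1.keys = st.1.keys ++ Δ ∧
      (∀ x ∈ Δ, x ∈ ps ∧ x ∉ st.1.keys) ∧
      (pvAddParents ps st).2 = (st.2 || !Δ.isEmpty) := by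
  induction ps with
  | nil =>
    intro st
    exact ⟨[], by simp [pvAddParents], by simp, by simp [pvAddParents]⟩
  | cons p ps ih =>
    intro st
    by_cases h : PySem.Dict.contains st.1 p = true
    · have hstep : pvAddParents (p :: ps) st = pvAddParents ps st := by
        simp [pvAddParents, h]
      obtain ⟨Δ, h1, h2, h3⟩ := ih st
      exact ⟨Δ, by rw [hstep]; exact h1,
        fun x hx => ⟨List.mem_cons_of_mem _ (h2 x hx).1, (h2 x hx).2⟩,
        by rw [hstep]; exact h3⟩
    · have hfalse : st.1.contains p = false := by
        simpa using h
      have hstep : pvAddParents (p :: ps) st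
          = pvAddParents ps (st.1.insert p true, true) := by
        simp [pvAddParents, h]
      have hkeys : (st.1.insert p true).keys = st.1.keys ++ [p] :=
        PySem.Dict.keys_insert_of_not_contains _ _ hfalse
      have hpnot : p ∉ st.1.keys := fun hmem =>
        h ((PySem.Dict.contains_iff_mem_keys _ _).2 hmem)
      obtain ⟨Δ, h1, h2, h3⟩ := ih (st.1.insert p true, true)
      refine ⟨p :: Δ, ?_, ?_, ?_⟩
      · rw [hstep, h1]
        simp [hkeys]
      · intro x hx
        rcases List.mem_cons.1 hx with rfl | hx
        · exact ⟨List.mem_cons_self .., hpnot⟩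
        · refine ⟨List.mem_cons_of_mem _ (h2 x hx).1, fun hk => (h2 x hx).2 ?_⟩
          rw [hkeys]
          exact List.mem_append_left _ hk
      · rw [hstep, h3]
        simp

lemma pvSweep_spec (parents : List (String × List String)) (snap : List String) :
    ∀ st : PySem.Dict String Bool × Bool, ∃ Δ : List String,
      (pvSweep parents snap st).1.keys = st.1.keys ++ Δ ∧
      (∀ x ∈ Δ, x ∈ parents.flatMap Prod.snd ∧ x ∉ st.1.keys) ∧
      (pvSweep parents snap st).2 = (st.2 || !Δ.isEmpty) := by
  induction snap with
  | nil =>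
    intro st
    exact ⟨[], by simp [pvSweep], by simp, by simp [pvSweep]⟩
  | cons node snap ih =>
    intro st
    have hstep : pvSweep parents (node :: snap) st
        = pvSweep parents snap (pvAddParents ((PySem.Dict.mk parents).getD node []) st) := by
      simp [pvSweep]
    obtain ⟨Δ1, g1, g2, g3⟩ :=
      pvAddParents_spec ((PySem.Dict.mk parents).getD node []) st
    obtain ⟨Δ2, k1, k2, k3⟩ := ih (pvAddParents ((PySem.Dict.mk parents).getD node []) st)
    refine ⟨Δ1 ++ Δ2, ?_, ?_, ?_⟩
    · rw [hstep, k1, g1, List.append_assoc]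
    · intro x hx
      rcases List.mem_append.1 hx with hx | hx
      · exact ⟨pv_getD_subset parents node x (g2 x hx).1, (g2 x hx).2⟩
      · refine ⟨(k2 x hx).1, fun hk => (k2 x hx).2 ?_⟩
        rw [g1]
        exact List.mem_append_left _ hk
    · rw [hstep, k3, g3]
      cases Δ1 <;> cases Δ2 <;> simp

-- the saturation loop: 'changed = True; while changed: changed = False; sweep'
def pvFixB (parents : List (String × List String)) (U : List String)
    (hU : ∀ x ∈ parents.flatMap Prod.snd, x ∈ U)
    (d : PySem.Dict String Bool) : PySem.Dict String Bool :=
  if h : (pvSweep parents (PySem.Dict.keys d) (d, false)).2 = true then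
    pvFixB parents U hU (pvSweep parents (PySem.Dict.keys d) (d, false)).1
  else
    (pvSweep parents (PySem.Dict.keys d) (d, false)).1
termination_by (U.filter (fun x => !PySem.Set.contains (PySem.Dict.keys d) x)).length
decreasing_by
  obtain ⟨Δ, h1, h2, h3⟩ := pvSweep_spec parents (PySem.Dict.keys d) (d, false)
  have hne : Δ ≠ [] := by
    intro h0
    rw [h0] at h3
    simp at h3
    rw [h3] at h
    exact absurd h (by simp)
  obtain ⟨c, hc⟩ := List.exists_mem_of_ne_nil Δ hne
  exact pv_filter_lt U (PySem.Dict.keys d) ((pvSweep parents (PySem.Dict.keys d) (d, false)).1.keys)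
    (fun x hx => by rw [h1]; exact List.mem_append_left _ hx)
    c (hU c (h2 c hc).1) (h2 c hc).2
    (by rw [h1]; exact List.mem_append_right _ hc)

-- lemmas.update(synsets.get(node, [])), the body of B's second pass
def pvUpd (synsets : List (String × List String)) (l : PySem.Set String) (node : String) : PySem.Set String :=
  PySem.Set.update l ((PySem.Dict.mk synsets).getD node [])

def wordnet_ancestors_py_alt (synset_id : String) (parents : List (String × List String)) (synsets : List (String × List String)) : List String :=
  (PySem.Dict.keys
      (pvFixB parents (synset_id :: parents.flatMap Prod.snd)
        (fun x hx => List.mem_cons_of_mem _ hx)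
        (PySem.Dict.mk [(synset_id, true)]))).foldl
    (pvUpd synsets) PySem.Set.empty

-- ===== PRECONDITION & SPEC =====
def Spec_wordnet_ancestors_py (synset_id : String) (parents : List (String × List String)) (synsets : List (String × List String)) (out : List String) : Prop := out = wordnet_ancestors_py_alt synset_id parents synsets
instance (synset_id : String) (parents : List (String × List String)) (synsets : List (String × List String)) (out : List String) : Decidable (Spec_wordnet_ancestors_py synset_id parents synsets out) := by unfold Spec_wordnet_ancestors_py; infer_instance

-- ===== CLAIM (what is proved, stated in full; the proofs are below) =====
def Claim_equal_wordnet_ancestors_py : Prop := ∀ (synset_id : String) (parents : List (String × List String)) (synsets : List (String × List String)), Dom_wordnet_ancestors_py synset_id parents synsets → Spec_wordnet_ancestors_py synset_id parents synsets (wordnet_ancestors_py synset_id parents synsets)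


-- ===== LEMMAS AND PROOFS =====
lemma pvLoopA_congr' (parents synsets : List (String × List String)) (U : List String)
    (hU : ∀ x ∈ parents.flatMap Prod.snd, x ∈ U) {q q' : List String}
    {seen seen' lemmas lemmas' : PySem.Set String}
    (hqq : q = q') (hss : seen = seen') (hll : lemmas = lemmas')
    (h : ∀ x ∈ q, x ∈ U) (h' : ∀ x ∈ q', x ∈ U) :
    pvLoopA parents synsets U hU q seen lemmas h = pvLoopA parents synsets U hU q' seen' lemmas' h' := by
  subst hqq; subst hss; subst hll; rfl

lemma pvLoopA_nil (parents synsets : List (String × List String)) (U : List String)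
    (hU : ∀ x ∈ parents.flatMap Prod.snd, x ∈ U) (seen lemmas : PySem.Set String)
    (h : ∀ x ∈ ([] : List String), x ∈ U) :
    pvLoopA parents synsets U hU [] seen lemmas h = lemmas := by
  rw [pvLoopA]

lemma pvLoopA_cons_mem (parents synsets : List (String × List String)) (U : List String)
    (hU : ∀ x ∈ parents.flatMap Prod.snd, x ∈ U) (c : String) (rest : List String)
    (seen lemmas : PySem.Set String) (hc : c ∈ seen)
    (h : ∀ x ∈ c :: rest, x ∈ U) (h2 : ∀ x ∈ rest, x ∈ U) :
    pvLoopA parents synsets U hU (c :: rest) seen lemmas h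
      = pvLoopA parents synsets U hU rest seen lemmas h2 := by
  rw [pvLoopA]
  rw [dif_pos ((PySem.Set.contains_iff seen c).2 hc)]

lemma pvLoopA_cons_not_mem (parents synsets : List (String × List String)) (U : List String)
    (hU : ∀ x ∈ parents.flatMap Prod.snd, x ∈ U) (c : String) (rest : List String)
    (seen lemmas : PySem.Set String) (hc : c ∉ seen)
    (h : ∀ x ∈ c :: rest, x ∈ U)
    (h2 : ∀ x ∈ rest ++ (PySem.Dict.mk parents).getD c [], x ∈ U) :
    pvLoopA parents synsets U hU (c :: rest) seen lemmas h
      = pvLoopA parents synsets U hU (rest ++ (PySem.Dict.mk parents).getD c [])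
          (PySem.Set.add seen c)
          (PySem.Set.update lemmas ((PySem.Dict.mk synsets).getD c [])) h2 := by
  rw [pvLoopA]
  rw [dif_neg (fun hx => hc ((PySem.Set.contains_iff seen c).1 hx))]

-- the level-synchronous BFS used as a PROOF INTERMEDIATE between the two ports
def pvLevel (parents : List (String × List String)) :
    List String → PySem.Set String → List String → List String →
      (PySem.Set String × List String × List String)
  | [], seen, order, nxt => (seen, order, nxt)
  | node :: f, seen, order, nxt =>
    if PySem.Set.contains seen node then
      pvLevel parents f seen order nxt
    else
      pvLevel parents f (PySem.Set.add seen node) (order ++ [node])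
        (nxt ++ (PySem.Dict.mk parents).getD node [])

lemma pvLevel_seen_mono (parents : List (String × List String)) (f : List String)
    (seen : PySem.Set String) (order nxt : List String) :
    ∀ x ∈ seen, x ∈ (pvLevel parents f seen order nxt).1 := by
  induction f generalizing seen order nxt with
  | nil => intro x hx; simpa [pvLevel] using hx
  | cons node f ih =>
    intro x hx
    by_cases h : node ∈ seen
    · simpa [pvLevel, h] using ih seen order nxt x hx
    · simp only [pvLevel, PySem.Set.contains_eq_listContains, List.contains_eq_mem, h,
        decide_false, Bool.false_eq_true, if_false]
      exact ih _ _ _ x ((PySem.Set.mem_add seen node x).2 (Or.inl hx))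

lemma pvLevel_dich (parents : List (String × List String)) (f : List String)
    (seen : PySem.Set String) (order nxt : List String) :
    pvLevel parents f seen order nxt = (seen, order, nxt) ∨
      ∃ c ∈ f, c ∉ seen ∧ c ∈ (pvLevel parents f seen order nxt).1 := by
  induction f generalizing seen order nxt with
  | nil => exact Or.inl rfl
  | cons node f ih =>
    by_cases h : node ∈ seen
    · rcases ih seen order nxt with h' | ⟨c, hc, h1, h2⟩
      · exact Or.inl (by simpa [pvLevel, h] using h')
      · exact Or.inr ⟨c, List.mem_cons_of_mem _ hc, h1, by simpa [pvLevel, h] using h2⟩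
    · refine Or.inr ⟨node, List.mem_cons_self .., h, ?_⟩
      simp only [pvLevel, PySem.Set.contains_eq_listContains, List.contains_eq_mem, h,
        decide_false, Bool.false_eq_true, if_false]
      exact pvLevel_seen_mono parents f _ _ _ node ((PySem.Set.mem_add seen node node).2 (Or.inr rfl))

lemma pvLevel_nxt_sub (parents : List (String × List String)) (f : List String)
    (seen : PySem.Set String) (order nxt : List String) :
    ∀ x ∈ (pvLevel parents f seen order nxt).2.2, x ∈ nxt ∨ x ∈ parents.flatMap Prod.snd := by
  induction f generalizing seen order nxt with
  | nil => intro x hx; exact Or.inl (by simpa [pvLevel] using hx)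
  | cons node f ih =>
    intro x hx
    by_cases h : node ∈ seen
    · exact ih seen order nxt x (by simpa [pvLevel, h] using hx)
    · simp only [pvLevel, PySem.Set.contains_eq_listContains, List.contains_eq_mem, h,
        decide_false, Bool.false_eq_true, if_false] at hx
      rcases ih _ _ _ x hx with h' | h'
      · rcases List.mem_append.1 h' with h'' | h''
        · exact Or.inl h''
        · exact Or.inr (pv_getD_subset parents node x h'')
      · exact Or.inr h'

def pvOuter (parents : List (String × List String)) (U : List String)
    (hU : ∀ x ∈ parents.flatMap Prod.snd, x ∈ U)
    (frontier : List String) (seen : PySem.Set String) (order : List String)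
    (hf : ∀ x ∈ frontier, x ∈ U) : List String :=
  if hne : frontier = [] then order
  else
    pvOuter parents U hU
      (pvLevel parents frontier seen order []).2.2
      (pvLevel parents frontier seen order []).1
      (pvLevel parents frontier seen order []).2.1
      (fun x hx => by
        rcases pvLevel_nxt_sub parents frontier seen order [] x hx with h | h
        · simp at h
        · exact hU x h)
termination_by 2 * (U.filter (fun x => !PySem.Set.contains seen x)).length + (if frontier = [] then 0 else 1)
decreasing_by
  rcases pvLevel_dich parents frontier seen order [] with h | ⟨c, hc, h1, h2⟩
  · rw [h]
    simp [hne]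
  · have hlt := pv_filter_lt U seen (pvLevel parents frontier seen order []).1
      (pvLevel_seen_mono parents frontier seen order []) c (hf c hc) h1 h2
    have hb : (if (pvLevel parents frontier seen order []).2.2 = [] then 0 else 1) ≤ 1 := by
      split <;> omega
    omega

lemma pvOuter_congr (parents : List (String × List String)) (U : List String)
    (hU : ∀ x ∈ parents.flatMap Prod.snd, x ∈ U) {frontier frontier' : List String}
    {seen seen' : PySem.Set String} {order order' : List String}
    (hff : frontier = frontier') (hss : seen = seen') (hoo : order = order')
    (h : ∀ x ∈ frontier, x ∈ U) (h' : ∀ x ∈ frontier', x ∈ U) :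
    pvOuter parents U hU frontier seen order h = pvOuter parents U hU frontier' seen' order' h' := by
  subst hff; subst hss; subst hoo; rfl

lemma pvOuter_nil (parents : List (String × List String)) (U : List String)
    (hU : ∀ x ∈ parents.flatMap Prod.snd, x ∈ U) (seen : PySem.Set String) (order : List String)
    (h : ∀ x ∈ ([] : List String), x ∈ U) :
    pvOuter parents U hU [] seen order h = order := by
  rw [pvOuter]
  simp

lemma pvOuter_step (parents : List (String × List String)) (U : List String)
    (hU : ∀ x ∈ parents.flatMap Prod.snd, x ∈ U) (frontier : List String)
    (seen : PySem.Set String) (order : List String) (hne : frontier ≠ [])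
    (h : ∀ x ∈ frontier, x ∈ U)
    (h2 : ∀ x ∈ (pvLevel parents frontier seen order []).2.2, x ∈ U) :
    pvOuter parents U hU frontier seen order h
      = pvOuter parents U hU (pvLevel parents frontier seen order []).2.2
          (pvLevel parents frontier seen order []).1
          (pvLevel parents frontier seen order []).2.1 h2 := by
  rw [pvOuter]
  rw [dif_neg hne]

lemma pvLevel_acc (parents : List (String × List String)) (f : List String)
    (seen : PySem.Set String) (order nxt : List String) :
    pvLevel parents f seen order nxt =
      ((pvLevel parents f seen [] []).1,
       order ++ (pvLevel parents f seen [] []).2.1,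
       nxt ++ (pvLevel parents f seen [] []).2.2) := by
  induction f generalizing seen order nxt with
  | nil => simp [pvLevel]
  | cons node f ih =>
    by_cases h : node ∈ seen
    · simp only [pvLevel, PySem.Set.contains_eq_listContains, List.contains_eq_mem, h,
        decide_true, if_true]
      exact ih seen order nxt
    · simp only [pvLevel, PySem.Set.contains_eq_listContains, List.contains_eq_mem, h,
        decide_false, Bool.false_eq_true, if_false]
      rw [ih (PySem.Set.add seen node) (order ++ [node]) (nxt ++ (PySem.Dict.mk parents).getD node []),
          ih (PySem.Set.add seen node) ([] ++ [node]) ([] ++ (PySem.Dict.mk parents).getD node [])]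
      simp [List.append_assoc]

lemma pv_q_nxt (parents : List (String × List String)) (U : List String)
    (hU : ∀ x ∈ parents.flatMap Prod.snd, x ∈ U) (q f : List String)
    (seen : PySem.Set String) (hq : ∀ x ∈ q, x ∈ U) :
    ∀ x ∈ q ++ (pvLevel parents f seen [] []).2.2, x ∈ U := by
  intro x hx
  rcases List.mem_append.1 hx with hx | hx
  · exact hq x hx
  · rcases pvLevel_nxt_sub parents f seen [] [] x hx with h0 | h0
    · simp at h0
    · exact hU x h0

lemma pv_bridge (parents synsets : List (String × List String)) (U : List String)
    (hU : ∀ x ∈ parents.flatMap Prod.snd, x ∈ U) (f : List String) :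
    ∀ (q : List String) (seen lemmas : PySem.Set String)
      (h : ∀ x ∈ f ++ q, x ∈ U)
      (h' : ∀ x ∈ q ++ (pvLevel parents f seen [] []).2.2, x ∈ U),
    pvLoopA parents synsets U hU (f ++ q) seen lemmas h =
      pvLoopA parents synsets U hU (q ++ (pvLevel parents f seen [] []).2.2)
        ((pvLevel parents f seen [] []).1)
        ((pvLevel parents f seen [] []).2.1.foldl (pvUpd synsets) lemmas) h' := by
  induction f with
  | nil =>
    intro q seen lemmas h h'
    exact pvLoopA_congr' parents synsets U hU (q.append_nil).symm rfl rfl h h'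
  | cons node f ih =>
    intro q seen lemmas h h'
    by_cases hn : node ∈ seen
    · have hlv : pvLevel parents (node :: f) seen [] [] = pvLevel parents f seen [] [] := by
        simp only [pvLevel, PySem.Set.contains_eq_listContains, List.contains_eq_mem, hn,
          decide_true, if_true]
      have h2 : ∀ x ∈ f ++ q, x ∈ U := fun x hx => h x (List.mem_cons_of_mem _ hx)
      have h3 : ∀ x ∈ q ++ (pvLevel parents f seen [] []).2.2, x ∈ U :=
        pv_q_nxt parents U hU q f seen
          (fun x hx => h x (List.mem_cons_of_mem _ (List.mem_append.2 (Or.inr hx))))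
      calc pvLoopA parents synsets U hU ((node :: f) ++ q) seen lemmas h
          = pvLoopA parents synsets U hU (f ++ q) seen lemmas h2 :=
            pvLoopA_cons_mem parents synsets U hU node (f ++ q) seen lemmas hn h h2
        _ = pvLoopA parents synsets U hU (q ++ (pvLevel parents f seen [] []).2.2)
              ((pvLevel parents f seen [] []).1)
              ((pvLevel parents f seen [] []).2.1.foldl (pvUpd synsets) lemmas) h3 :=
            ih q seen lemmas h2 h3
        _ = pvLoopA parents synsets U hU (q ++ (pvLevel parents (node :: f) seen [] []).2.2)
              ((pvLevel parents (node :: f) seen [] []).1)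
              ((pvLevel parents (node :: f) seen [] []).2.1.foldl (pvUpd synsets) lemmas) h' :=
            pvLoopA_congr' parents synsets U hU (by rw [hlv]) (by rw [hlv]) (by rw [hlv]) h3 h'
    · have hlv : pvLevel parents (node :: f) seen [] [] =
          ((pvLevel parents f (PySem.Set.add seen node) [] []).1,
           node :: (pvLevel parents f (PySem.Set.add seen node) [] []).2.1,
           (PySem.Dict.mk parents).getD node []
             ++ (pvLevel parents f (PySem.Set.add seen node) [] []).2.2) := by
        simp only [pvLevel, PySem.Set.contains_eq_listContains, List.contains_eq_mem, hn,
          decide_false, Bool.false_eq_true, if_false]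
        rw [pvLevel_acc parents f (PySem.Set.add seen node) ([] ++ [node])
            ([] ++ (PySem.Dict.mk parents).getD node [])]
        simp
      have hP : ∀ x ∈ (PySem.Dict.mk parents).getD node [], x ∈ U :=
        fun x hx => hU x (pv_getD_subset parents node x hx)
      have h2 : ∀ x ∈ f ++ (q ++ (PySem.Dict.mk parents).getD node []), x ∈ U := by
        intro x hx
        rcases List.mem_append.1 hx with hx | hx
        · exact h x (List.mem_cons_of_mem _ (List.mem_append.2 (Or.inl hx)))
        · rcases List.mem_append.1 hx with hx | hx
          · exact h x (List.mem_cons_of_mem _ (List.mem_append.2 (Or.inr hx)))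
          · exact hP x hx
      have h3 : ∀ x ∈ (q ++ (PySem.Dict.mk parents).getD node [])
            ++ (pvLevel parents f (PySem.Set.add seen node) [] []).2.2, x ∈ U :=
        pv_q_nxt parents U hU _ f (PySem.Set.add seen node) (by
          intro x hx
          rcases List.mem_append.1 hx with hx | hx
          · exact h x (List.mem_cons_of_mem _ (List.mem_append.2 (Or.inr hx)))
          · exact hP x hx)
      have hX : ∀ x ∈ (f ++ q) ++ (PySem.Dict.mk parents).getD node [], x ∈ U := by
        intro x hx
        rcases List.mem_append.1 hx with hx | hx
        · exact h x (List.mem_cons_of_mem _ hx)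
        · exact hP x hx
      calc pvLoopA parents synsets U hU ((node :: f) ++ q) seen lemmas h
          = pvLoopA parents synsets U hU ((f ++ q) ++ (PySem.Dict.mk parents).getD node [])
              (PySem.Set.add seen node)
              (PySem.Set.update lemmas ((PySem.Dict.mk synsets).getD node [])) hX :=
            pvLoopA_cons_not_mem parents synsets U hU node (f ++ q) seen lemmas hn h hX
        _ = pvLoopA parents synsets U hU (f ++ (q ++ (PySem.Dict.mk parents).getD node []))
              (PySem.Set.add seen node)
              (PySem.Set.update lemmas ((PySem.Dict.mk synsets).getD node [])) h2 :=
            pvLoopA_congr' parents synsets U hU (List.append_assoc f q _) rfl rfl hX h2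
        _ = pvLoopA parents synsets U hU
              ((q ++ (PySem.Dict.mk parents).getD node [])
                ++ (pvLevel parents f (PySem.Set.add seen node) [] []).2.2)
              ((pvLevel parents f (PySem.Set.add seen node) [] []).1)
              ((pvLevel parents f (PySem.Set.add seen node) [] []).2.1.foldl (pvUpd synsets)
                (PySem.Set.update lemmas ((PySem.Dict.mk synsets).getD node []))) h3 :=
            ih (q ++ (PySem.Dict.mk parents).getD node []) (PySem.Set.add seen node)
              (PySem.Set.update lemmas ((PySem.Dict.mk synsets).getD node [])) h2 h3
        _ = pvLoopA parents synsets U hU (q ++ (pvLevel parents (node :: f) seen [] []).2.2)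
              ((pvLevel parents (node :: f) seen [] []).1)
              ((pvLevel parents (node :: f) seen [] []).2.1.foldl (pvUpd synsets) lemmas) h' := by
            refine pvLoopA_congr' parents synsets U hU ?_ ?_ ?_ h3 h'
            · rw [hlv]; exact List.append_assoc q _ _
            · rw [hlv]
            · rw [hlv]; rfl

lemma pv_main_aux (parents synsets : List (String × List String)) (U : List String)
    (hU : ∀ x ∈ parents.flatMap Prod.snd, x ∈ U) :
    ∀ (n : Nat) (frontier : List String) (seen : PySem.Set String) (order : List String)
      (h h' : ∀ x ∈ frontier, x ∈ U),
      2 * (U.filter (fun x => !PySem.Set.contains seen x)).length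
        + (if frontier = [] then 0 else 1) ≤ n →
      pvLoopA parents synsets U hU frontier seen (order.foldl (pvUpd synsets) PySem.Set.empty) h
        = (pvOuter parents U hU frontier seen order h').foldl (pvUpd synsets) PySem.Set.empty := by
  intro n
  induction n with
  | zero =>
    intro frontier seen order h h' hm
    have hne : frontier = [] := by
      by_contra hc
      simp only [hc, if_false] at hm
      omega
    subst hne
    rw [pvLoopA_nil, pvOuter_nil]
  | succ n ihn =>
    intro frontier seen order h h' hm
    by_cases hne : frontier = []
    · subst hne
      rw [pvLoopA_nil, pvOuter_nil]
    · have hlv := pvLevel_acc parents frontier seen order []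
      have h3 : ∀ x ∈ (pvLevel parents frontier seen [] []).2.2, x ∈ U := by
        intro x hx
        exact pv_q_nxt parents U hU [] frontier seen (by simp) x (by simpa using hx)
      have h4 : ∀ x ∈ (pvLevel parents frontier seen order []).2.2, x ∈ U := by
        rw [hlv]; simpa using h3
      have hb : ∀ x ∈ frontier ++ ([] : List String), x ∈ U := by simpa using h
      have hb2 : ∀ x ∈ ([] : List String) ++ (pvLevel parents frontier seen [] []).2.2, x ∈ U := by
        simpa using h3
      have step1 : pvLoopA parents synsets U hU frontier seen
            (order.foldl (pvUpd synsets) PySem.Set.empty) h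
          = pvLoopA parents synsets U hU ((pvLevel parents frontier seen [] []).2.2)
              ((pvLevel parents frontier seen [] []).1)
              ((pvLevel parents frontier seen [] []).2.1.foldl (pvUpd synsets)
                (order.foldl (pvUpd synsets) PySem.Set.empty)) h3 := by
        calc pvLoopA parents synsets U hU frontier seen
              (order.foldl (pvUpd synsets) PySem.Set.empty) h
            = pvLoopA parents synsets U hU (frontier ++ [])
                seen (order.foldl (pvUpd synsets) PySem.Set.empty) hb :=
              pvLoopA_congr' parents synsets U hU (frontier.append_nil).symm rfl rfl h hb
          _ = pvLoopA parents synsets U hU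
                (([] : List String) ++ (pvLevel parents frontier seen [] []).2.2)
                ((pvLevel parents frontier seen [] []).1)
                ((pvLevel parents frontier seen [] []).2.1.foldl (pvUpd synsets)
                  (order.foldl (pvUpd synsets) PySem.Set.empty)) hb2 :=
              pv_bridge parents synsets U hU frontier []
                seen (order.foldl (pvUpd synsets) PySem.Set.empty) hb hb2
          _ = _ := pvLoopA_congr' parents synsets U hU rfl rfl rfl hb2 h3
      have hfold : (pvLevel parents frontier seen [] []).2.1.foldl (pvUpd synsets)
            (order.foldl (pvUpd synsets) PySem.Set.empty)
          = (order ++ (pvLevel parents frontier seen [] []).2.1).foldl (pvUpd synsets)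
              PySem.Set.empty := (List.foldl_append ..).symm
      have hmono : ∀ x ∈ seen, x ∈ (pvLevel parents frontier seen [] []).1 :=
        pvLevel_seen_mono parents frontier seen [] []
      have hmeas : 2 * (U.filter (fun x =>
            !PySem.Set.contains ((pvLevel parents frontier seen [] []).1) x)).length
          + (if (pvLevel parents frontier seen [] []).2.2 = [] then 0 else 1) ≤ n := by
        rcases pvLevel_dich parents frontier seen [] [] with hd | ⟨c, hc, hc1, hc2⟩
        · rw [hd]
          simp only [if_true]
          simp only [hne, if_false] at hm
          omega
        · have hlt := pv_filter_lt U seen ((pvLevel parents frontier seen [] []).1)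
            hmono c (h c hc) hc1 hc2
          simp only [hne, if_false] at hm
          have : (if (pvLevel parents frontier seen [] []).2.2 = [] then 0 else 1) ≤ 1 := by
            split <;> omega
          omega
      calc pvLoopA parents synsets U hU frontier seen
            (order.foldl (pvUpd synsets) PySem.Set.empty) h
          = pvLoopA parents synsets U hU ((pvLevel parents frontier seen [] []).2.2)
              ((pvLevel parents frontier seen [] []).1)
              ((order ++ (pvLevel parents frontier seen [] []).2.1).foldl (pvUpd synsets)
                PySem.Set.empty) h3 := by rw [step1, hfold]
        _ = (pvOuter parents U hU ((pvLevel parents frontier seen [] []).2.2)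
              ((pvLevel parents frontier seen [] []).1)
              (order ++ (pvLevel parents frontier seen [] []).2.1) h3).foldl
                (pvUpd synsets) PySem.Set.empty :=
            ihn ((pvLevel parents frontier seen [] []).2.2)
              ((pvLevel parents frontier seen [] []).1)
              (order ++ (pvLevel parents frontier seen [] []).2.1) h3 h3 hmeas
        _ = (pvOuter parents U hU ((pvLevel parents frontier seen order []).2.2)
              ((pvLevel parents frontier seen order []).1)
              ((pvLevel parents frontier seen order []).2.1) h4).foldl
                (pvUpd synsets) PySem.Set.empty := by
            rw [pvOuter_congr parents U hU (frontier' := (pvLevel parents frontier seen order []).2.2)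
              (seen' := (pvLevel parents frontier seen order []).1)
              (order' := (pvLevel parents frontier seen order []).2.1)
              (by rw [hlv]; simp) (by rw [hlv]) (by rw [hlv]) h3 h4]
        _ = (pvOuter parents U hU frontier seen order h').foldl (pvUpd synsets) PySem.Set.empty := by
            rw [pvOuter_step parents U hU frontier seen order hne h' h4]

lemma pv_main (parents synsets : List (String × List String)) (U : List String)
    (hU : ∀ x ∈ parents.flatMap Prod.snd, x ∈ U)
    (frontier : List String) (seen : PySem.Set String) (order : List String)
    (h h' : ∀ x ∈ frontier, x ∈ U) :
    pvLoopA parents synsets U hU frontier seen (order.foldl (pvUpd synsets) PySem.Set.empty) h =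
      (pvOuter parents U hU frontier seen order h').foldl (pvUpd synsets) PySem.Set.empty :=
  pv_main_aux parents synsets U hU
    (2 * (U.filter (fun x => !PySem.Set.contains seen x)).length
      + (if frontier = [] then 0 else 1))
    frontier seen order h h' (Nat.le_refl _)

-- ordered-set insertion of a batch, the list-level shape shared by the sweep and the level pass
def addNew (ps K : List String) : List String :=
  ps.foldl (fun K p => if p ∈ K then K else K ++ [p]) K

lemma addNew_nil (K : List String) : addNew [] K = K := rfl

lemma addNew_cons_mem {p : String} {K : List String} (h : p ∈ K) (ps : List String) :
    addNew (p :: ps) K = addNew ps K := by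
  simp [addNew, h]

lemma addNew_cons_not_mem {p : String} {K : List String} (h : p ∉ K) (ps : List String) :
    addNew (p :: ps) K = addNew ps (K ++ [p]) := by
  simp [addNew, h]

lemma addNew_append (ps1 ps2 K : List String) :
    addNew (ps1 ++ ps2) K = addNew ps2 (addNew ps1 K) := by
  simp [addNew, List.foldl_append]

lemma mem_addNew_left (ps : List String) : ∀ (K : List String) (x : String), x ∈ K → x ∈ addNew ps K := by
  induction ps with
  | nil => intro K x hx; simpa [addNew_nil] using hx
  | cons p ps ih =>
    intro K x hx
    by_cases h : p ∈ K
    · rw [addNew_cons_mem h]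
      exact ih K x hx
    · rw [addNew_cons_not_mem h]
      exact ih (K ++ [p]) x (List.mem_append_left _ hx)

lemma mem_addNew_right (ps : List String) : ∀ (K : List String) (x : String), x ∈ ps → x ∈ addNew ps K := by
  induction ps with
  | nil => intro K x hx; simp at hx
  | cons p ps ih =>
    intro K x hx
    rcases List.mem_cons.1 hx with rfl | hx
    · by_cases h : x ∈ K
      · rw [addNew_cons_mem h]
        exact mem_addNew_left ps K x h
      · rw [addNew_cons_not_mem h]
        exact mem_addNew_left ps (K ++ [x]) x (List.mem_append_right _ (List.mem_singleton.2 rfl))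
    · by_cases h : p ∈ K
      · rw [addNew_cons_mem h]
        exact ih K x hx
      · rw [addNew_cons_not_mem h]
        exact ih (K ++ [p]) x hx

lemma addNew_of_subset (ps : List String) : ∀ K : List String, (∀ p ∈ ps, p ∈ K) → addNew ps K = K := by
  induction ps with
  | nil => intro K _; rfl
  | cons p ps ih =>
    intro K hsub
    rw [addNew_cons_mem (hsub p (List.mem_cons_self ..))]
    exact ih K (fun q hq => hsub q (List.mem_cons_of_mem _ hq))

-- the list-level shadow of one sweep
def sweepL (parents : List (String × List String)) (snap K : List String) : List String :=
  snap.foldl (fun K n => addNew ((PySem.Dict.mk parents).getD n []) K) K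

lemma sweepL_append (parents : List (String × List String)) (s1 s2 K : List String) :
    sweepL parents (s1 ++ s2) K = sweepL parents s2 (sweepL parents s1 K) := by
  simp [sweepL, List.foldl_append]

lemma sweepL_closed (parents : List (String × List String)) (snap : List String) :
    ∀ K : List String, (∀ x ∈ snap, ∀ p ∈ (PySem.Dict.mk parents).getD x [], p ∈ K) →
      sweepL parents snap K = K := by
  induction snap with
  | nil => intro K _; rfl
  | cons node snap ih =>
    intro K hcl
    have h1 : addNew ((PySem.Dict.mk parents).getD node []) K = K :=
      addNew_of_subset _ K (hcl node (List.mem_cons_self ..))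
    have hstep : sweepL parents (node :: snap) K = sweepL parents snap K := by
      simp only [sweepL, List.foldl_cons, h1]
    rw [hstep]
    exact ih K (fun x hx => hcl x (List.mem_cons_of_mem _ hx))

lemma sweepL_flat (parents : List (String × List String)) (snap : List String) :
    ∀ K : List String,
      sweepL parents snap K
        = addNew (snap.flatMap (fun n => (PySem.Dict.mk parents).getD n [])) K := by
  induction snap with
  | nil => intro K; rfl
  | cons node snap ih =>
    intro K
    have hstep : sweepL parents (node :: snap) K
        = sweepL parents snap (addNew ((PySem.Dict.mk parents).getD node []) K) := by
      simp only [sweepL, List.foldl_cons]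
    rw [hstep, ih, List.flatMap_cons, addNew_append]

-- one level pass with seen = order = o, characterised through addNew
lemma pvLevel_addNew (parents : List (String × List String)) (f : List String) :
    ∀ (o nxt0 : List String), ∃ Δ : List String,
      addNew f o = o ++ Δ ∧ (∀ x ∈ Δ, x ∈ f ∧ x ∉ o) ∧
      pvLevel parents f o o nxt0 =
        (o ++ Δ, o ++ Δ,
          nxt0 ++ Δ.flatMap (fun n => (PySem.Dict.mk parents).getD n [])) := by
  induction f with
  | nil =>
    intro o nxt0
    exact ⟨[], by simp [addNew_nil], by simp, by simp [pvLevel]⟩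
  | cons node f ih =>
    intro o nxt0
    by_cases h : node ∈ o
    · obtain ⟨Δ, h1, h2, h3⟩ := ih o nxt0
      refine ⟨Δ, ?_, ?_, ?_⟩
      · rw [addNew_cons_mem h]
        exact h1
      · intro x hx
        exact ⟨List.mem_cons_of_mem _ (h2 x hx).1, (h2 x hx).2⟩
      · rw [show pvLevel parents (node :: f) o o nxt0 = pvLevel parents f o o nxt0 from by
          simp only [pvLevel, PySem.Set.contains_eq_listContains, List.contains_eq_mem, h,
            decide_true, if_true]]
        exact h3
    · obtain ⟨Δ, h1, h2, h3⟩ := ih (o ++ [node]) (nxt0 ++ (PySem.Dict.mk parents).getD node [])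
      refine ⟨node :: Δ, ?_, ?_, ?_⟩
      · rw [addNew_cons_not_mem h, h1]
        simp
      · intro x hx
        rcases List.mem_cons.1 hx with rfl | hx
        · exact ⟨List.mem_cons_self .., h⟩
        · refine ⟨List.mem_cons_of_mem _ (h2 x hx).1, fun hk => (h2 x hx).2 ?_⟩
          exact List.mem_append_left _ hk
      · have hadd : PySem.Set.add o node = o ++ [node] := by
          simp [PySem.Set.add, PySem.Set.contains_eq_listContains, List.contains_eq_mem, h]
        rw [show pvLevel parents (node :: f) o o nxt0
              = pvLevel parents f (o ++ [node]) (o ++ [node])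
                  (nxt0 ++ (PySem.Dict.mk parents).getD node []) from by
            simp only [pvLevel, PySem.Set.contains_eq_listContains, List.contains_eq_mem, h,
              decide_false, Bool.false_eq_true, if_false, hadd]]
        rw [h3]
        simp [List.append_assoc]

-- the dict-level sweep computes addNew / sweepL on its key list
lemma pvAddParents_keys (ps : List String) :
    ∀ (d : PySem.Dict String Bool) (c : Bool),
      (pvAddParents ps (d, c)).1.keys = addNew ps (PySem.Dict.keys d) := by
  induction ps with
  | nil => intro d c; rfl
  | cons p ps ih =>
    intro d c
    by_cases h : PySem.Dict.contains d p = true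
    · have hmem : p ∈ d.keys := (PySem.Dict.contains_iff_mem_keys d p).1 h
      have hstep : pvAddParents (p :: ps) (d, c) = pvAddParents ps (d, c) := by
        simp [pvAddParents, h]
      rw [hstep, addNew_cons_mem hmem]
      exact ih d c
    · have hfalse : d.contains p = false := by simpa using h
      have hnmem : p ∉ d.keys := fun hmem =>
        h ((PySem.Dict.contains_iff_mem_keys d p).2 hmem)
      have hstep : pvAddParents (p :: ps) (d, c)
          = pvAddParents ps (d.insert p true, true) := by
        simp [pvAddParents, h]
      rw [hstep, addNew_cons_not_mem hnmem, ih (d.insert p true) true,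
        PySem.Dict.keys_insert_of_not_contains d _ hfalse]

lemma pvSweep_keys (parents : List (String × List String)) (snap : List String) :
    ∀ (d : PySem.Dict String Bool) (c : Bool),
      (pvSweep parents snap (d, c)).1.keys = sweepL parents snap (PySem.Dict.keys d) := by
  induction snap with
  | nil => intro d c; rfl
  | cons node snap ih =>
    intro d c
    have hstep : pvSweep parents (node :: snap) (d, c)
        = pvSweep parents snap
            ((pvAddParents ((PySem.Dict.mk parents).getD node []) (d, c)).1,
             (pvAddParents ((PySem.Dict.mk parents).getD node []) (d, c)).2) := by
      simp [pvSweep]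
    have hstep2 : sweepL parents (node :: snap) (PySem.Dict.keys d)
        = sweepL parents snap (addNew ((PySem.Dict.mk parents).getD node []) (PySem.Dict.keys d)) := by
      simp only [sweepL, List.foldl_cons]
    rw [hstep, hstep2, ih, pvAddParents_keys]

-- a frontier already absorbed in K adds nothing to pvOuter
lemma pvOuter_of_absorbed (parents : List (String × List String)) (U : List String)
    (hU : ∀ x ∈ parents.flatMap Prod.snd, x ∈ U) (w K : List String)
    (h : ∀ x ∈ w, x ∈ U) (habs : ∀ x ∈ w, x ∈ K) :
    pvOuter parents U hU w K K h = K := by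
  by_cases hw : w = []
  · subst hw
    exact pvOuter_nil parents U hU K K h
  · obtain ⟨Δ2, hK2, hΔ2, hlev2⟩ := pvLevel_addNew parents w K []
    have habs' : addNew w K = K := addNew_of_subset _ K habs
    have hΔnil : Δ2 = [] := by
      have heq := hK2.symm.trans habs'
      have hlen := congrArg List.length heq
      simp at hlen
      exact hlen
    subst hΔnil
    have hlev3 : pvLevel parents w K K [] = (K, K, []) := by
      rw [hlev2]
      simp
    have h2 : ∀ x ∈ (pvLevel parents w K K []).2.2, x ∈ U := by
      rw [hlev3]
      intro x hx
      simp at hx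
    rw [pvOuter_step parents U hU w K K hw h h2]
    rw [pvOuter_congr parents U hU (frontier' := ([] : List String)) (seen' := K) (order' := K)
      (by rw [hlev3]) (by rw [hlev3]) (by rw [hlev3]) h2 (by intro x hx; simp at hx)]
    exact pvOuter_nil parents U hU K K _

-- THE BRIDGE: the level BFS from (f, o, o) computes the key list of the saturation loop
lemma pv_bridge2 (parents : List (String × List String)) (U : List String)
    (hU : ∀ x ∈ parents.flatMap Prod.snd, x ∈ U) :
    ∀ n : Nat, ∀ (f o : List String) (hf : ∀ x ∈ f, x ∈ U),
      (∀ x ∈ o, ∀ p ∈ (PySem.Dict.mk parents).getD x [], p ∈ addNew f o) →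
      ∀ d : PySem.Dict String Bool, PySem.Dict.keys d = addNew f o →
      (U.filter (fun x => !PySem.Set.contains o x)).length ≤ n →
      pvOuter parents U hU f o o hf = PySem.Dict.keys (pvFixB parents U hU d) := by
  intro n
  induction n using Nat.strong_induction_on with
  | _ n ih =>
  intro f o hf hcl d hd hn
  obtain ⟨Δ, hK, hΔ, hlev⟩ := pvLevel_addNew parents f o []
  obtain ⟨Δs, hks, hmemS, hflag⟩ := pvSweep_spec parents (PySem.Dict.keys d) (d, false)
  have hsw : (pvSweep parents (PySem.Dict.keys d) (d, false)).1.keys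
      = addNew (Δ.flatMap (fun m => (PySem.Dict.mk parents).getD m [])) (addNew f o) := by
    rw [pvSweep_keys, hd, hK, sweepL_append,
      sweepL_closed parents o (o ++ Δ) (fun x hx p hp => by rw [← hK]; exact hcl x hx p hp),
      sweepL_flat, ← hK]
  have hnxtU : ∀ x ∈ Δ.flatMap (fun m => (PySem.Dict.mk parents).getD m []), x ∈ U := by
    intro x hx
    obtain ⟨m, _, hxm⟩ := List.mem_flatMap.1 hx
    exact hU x (pv_getD_subset parents m x hxm)
  have hstepA : f ≠ [] →
      pvOuter parents U hU f o o hf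
        = pvOuter parents U hU (Δ.flatMap (fun m => (PySem.Dict.mk parents).getD m []))
            (o ++ Δ) (o ++ Δ) hnxtU := by
    intro hfne
    have h2 : ∀ x ∈ (pvLevel parents f o o []).2.2, x ∈ U := by
      rw [hlev]
      simpa using hnxtU
    rw [pvOuter_step parents U hU f o o hfne hf h2]
    exact pvOuter_congr parents U hU (by rw [hlev]; simp) (by rw [hlev]) (by rw [hlev]) h2 hnxtU
  by_cases hΔs0 : Δs = []
  · -- the sweep added nothing: both sides stop at addNew f o
    have hfl : (pvSweep parents (PySem.Dict.keys d) (d, false)).2 = false := by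
      rw [hflag, hΔs0]
      simp
    have hB : pvFixB parents U hU d = (pvSweep parents (PySem.Dict.keys d) (d, false)).1 := by
      rw [pvFixB]
      simp [hfl]
    have hkeq : PySem.Dict.keys (pvFixB parents U hU d) = addNew f o := by
      rw [hB, hks, hΔs0, List.append_nil, hd]
    have hKK : addNew (Δ.flatMap (fun m => (PySem.Dict.mk parents).getD m [])) (addNew f o)
        = addNew f o := by
      rw [← hsw, hks, hΔs0, List.append_nil, hd]
    rw [hkeq]
    by_cases hfne : f = []
    · subst hfne
      rw [pvOuter_nil]
      exact (addNew_nil o).symm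
    · rw [hstepA hfne, ← hK]
      refine pvOuter_of_absorbed parents U hU _ _ hnxtU ?_
      intro x hx
      rw [← hKK]
      exact mem_addNew_right _ _ x hx
  · -- the sweep grew the dict: one level pass on each side, then the induction hypothesis
    have hfl : (pvSweep parents (PySem.Dict.keys d) (d, false)).2 = true := by
      rw [hflag]
      cases Δs with
      | nil => exact absurd rfl hΔs0
      | cons a as => simp
    have hB : pvFixB parents U hU d
        = pvFixB parents U hU (pvSweep parents (PySem.Dict.keys d) (d, false)).1 := by
      rw [pvFixB]
      simp [hfl]
    have hΔne : Δ ≠ [] := by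
      intro h0
      apply hΔs0
      have hkeq : (pvSweep parents (PySem.Dict.keys d) (d, false)).1.keys = PySem.Dict.keys d := by
        rw [hsw, h0]
        simp only [List.flatMap_nil, addNew_nil]
        exact hd.symm
      have heq := hks.symm.trans hkeq
      have hlen := congrArg List.length heq
      simp at hlen
      exact hlen
    have hfne : f ≠ [] := by
      intro h0
      apply hΔne
      rw [h0, addNew_nil] at hK
      have hlen := congrArg List.length hK
      simp at hlen
      exact hlen
    obtain ⟨c, hc⟩ := List.exists_mem_of_ne_nil Δ hΔne
    have hlt : (U.filter (fun x => !PySem.Set.contains (addNew f o) x)).length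
        < (U.filter (fun x => !PySem.Set.contains o x)).length :=
      pv_filter_lt U o (addNew f o)
        (fun x hx => by rw [hK]; exact List.mem_append_left _ hx)
        c (hf c (hΔ c hc).1) ((hΔ c hc).2)
        (by rw [hK]; exact List.mem_append_right _ hc)
    have hcl' : ∀ x ∈ addNew f o, ∀ p ∈ (PySem.Dict.mk parents).getD x [],
        p ∈ addNew (Δ.flatMap (fun m => (PySem.Dict.mk parents).getD m [])) (addNew f o) := by
      intro x hx p hp
      rw [hK] at hx
      rcases List.mem_append.1 hx with hx | hx
      · exact mem_addNew_left _ _ p (hcl x hx p hp)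
      · exact mem_addNew_right _ _ p (List.mem_flatMap.2 ⟨x, hx, hp⟩)
    have hihres := ih ((U.filter (fun x => !PySem.Set.contains (addNew f o) x)).length)
      (lt_of_lt_of_le hlt hn)
      (Δ.flatMap (fun m => (PySem.Dict.mk parents).getD m [])) (addNew f o) hnxtU hcl'
      (pvSweep parents (PySem.Dict.keys d) (d, false)).1 hsw (Nat.le_refl _)
    rw [hstepA hfne, hB, ← hK]
    exact hihres

-- ===== VERDICT (by name: the statement is the Claim_ definition above) =====
theorem wordnet_ancestors_py_spec : Claim_equal_wordnet_ancestors_py := by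
  intro synset_id parents synsets _
  unfold Spec_wordnet_ancestors_py wordnet_ancestors_py wordnet_ancestors_py_alt
  have h1 := pv_main parents synsets (synset_id :: parents.flatMap Prod.snd)
    (fun x hx => List.mem_cons_of_mem _ hx)
    [synset_id] PySem.Set.empty []
    (fun x hx => by
      simp only [List.mem_singleton] at hx
      exact hx ▸ List.mem_cons_self ..)
    (fun x hx => by
      simp only [List.mem_singleton] at hx
      exact hx ▸ List.mem_cons_self ..)
  have h2 := pv_bridge2 parents (synset_id :: parents.flatMap Prod.snd)
    (fun x hx => List.mem_cons_of_mem _ hx)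
    (((synset_id :: parents.flatMap Prod.snd).filter
        (fun x => !PySem.Set.contains ([] : List String) x)).length)
    [synset_id] []
    (fun x hx => by
      simp only [List.mem_singleton] at hx
      exact hx ▸ List.mem_cons_self ..)
    (by intro x hx; simp at hx)
    (PySem.Dict.mk [(synset_id, true)])
    (by simp [addNew])
    (Nat.le_refl _)
  exact h1.trans (congrArg (fun L => L.foldl (pvUpd synsets) PySem.Set.empty) h2)
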